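-- pv_equiv track=rewrite | github.com/internet-sicherheit/Padding-Matters---Exploring-Function-Detection-in-PE-Files | tools/rnn/code/utils.py | memory_map_to_rnn_struct
-- ===== SOURCE A (Python) =====
-- from typing import List, Dict, Tuple, Union
--
-- SLICE_SIZE = 1000
--
-- def memory_map_to_rnn_struct(memory_map: List[Dict[int, Tuple[int, int]]]) -> Tuple[List[List[int]], List[List[int]]]:
--     """
--     Converts the memory map into data structures that are required by the RNN.
--
--     :param memory_map: the memory map that should be converted
--     :returns: two lists, one contains the byte values, one the function start markings
--     """
--
--     byte_values_slices = []
--     function_starts_slices = []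
--     for mm in memory_map:
--         # 1. extract the values and store them in a list
--         bytes_with_function_start = list(mm.values())
--         # if the section does not contain any functions starts, skip
--         if not bytes_with_function_start:
--             continue
--         # 2. separate the byte values and the function start markings
--         byte_values, function_starts = zip(*bytes_with_function_start)
--         # 3. convert the tuples into lists
--         byte_values = list(byte_values)
--         function_starts = list(function_starts)
--         # 4. split the lists into slices
--         byte_values_slices += [byte_values[i:i + SLICE_SIZE] for i in range(0, len(byte_values), SLICE_SIZE)]
--         function_starts_slices += [function_starts[i:i + SLICE_SIZE] for i in
--                                    range(0, len(function_starts), SLICE_SIZE)]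
--
--     return byte_values_slices, function_starts_slices
-- ===== SOURCE B (Python) =====
-- from typing import List, Dict, Tuple
--
-- SLICE_SIZE = 1000
--
-- def memory_map_to_rnn_struct(memory_map: List[Dict[int, Tuple[int, int]]]) -> Tuple[List[List[int]], List[List[int]]]:
--     """Streaming pass: no zip(*...) and no slicing — walk each section's values
--     once, growing a pair of current-chunk buffers and flushing them whenever
--     they fill up to SLICE_SIZE, with a final partial flush per section."""
--     byte_values_slices = []
--     function_starts_slices = []
--     for mm in memory_map:
--         cur_bytes = []
--         cur_starts = []
--         for b, f in mm.values():
--             cur_bytes.append(b)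
--             cur_starts.append(f)
--             if len(cur_bytes) == SLICE_SIZE:
--                 byte_values_slices.append(cur_bytes)
--                 function_starts_slices.append(cur_starts)
--                 cur_bytes = []
--                 cur_starts = []
--         if cur_bytes:
--             byte_values_slices.append(cur_bytes)
--             function_starts_slices.append(cur_starts)
--     return byte_values_slices, function_starts_slices
-- ===== Notes on version B (the rewrite author's own statement) =====
-- stated objective: alternative
-- what changed: B replaces A's unzip-whole-list-then-slice-both-lists passes with a single streaming pass that never slices or zips: it walks each section's (byte, start) values once, accumulating current-chunk buffers and flushing them whenever they reach SLICE_SIZE, with a final partial flush; the empty-section guard disappears because an empty section simply flushes nothing.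
import Mathlib
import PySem

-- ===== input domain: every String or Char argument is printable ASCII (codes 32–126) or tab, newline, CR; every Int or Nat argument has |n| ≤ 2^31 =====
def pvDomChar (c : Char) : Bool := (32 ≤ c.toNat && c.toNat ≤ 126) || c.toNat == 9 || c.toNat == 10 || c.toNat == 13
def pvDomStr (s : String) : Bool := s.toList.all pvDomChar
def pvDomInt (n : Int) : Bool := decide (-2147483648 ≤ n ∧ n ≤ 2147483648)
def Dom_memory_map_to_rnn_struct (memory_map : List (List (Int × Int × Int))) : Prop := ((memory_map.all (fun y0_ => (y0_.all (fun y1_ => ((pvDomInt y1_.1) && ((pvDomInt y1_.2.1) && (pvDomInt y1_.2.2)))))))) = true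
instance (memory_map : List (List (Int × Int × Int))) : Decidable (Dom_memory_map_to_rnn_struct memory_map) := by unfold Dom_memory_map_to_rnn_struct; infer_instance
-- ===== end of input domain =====

-- B replaces A's unzip-then-slice passes by one streaming pass with chunk buffers
-- flushed at SLICE_SIZE (objective: alternative).

set_option maxRecDepth 20000


-- ===== PORT A =====
-- one iteration of A's loop body over accumulator (byte_values_slices, function_starts_slices)
def pvStepA (acc : List (List Int) × List (List Int)) (mm : List (Int × Int × Int)) :
    List (List Int) × List (List Int) :=
  let bytes_with_function_start := (PySem.Dict.ofList mm).values
  if bytes_with_function_start.isEmpty then acc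
  else
    let byte_values := bytes_with_function_start.map (·.1)       -- zip(*…) first components
    let function_starts := bytes_with_function_start.map (·.2)   -- zip(*…) second components
    (acc.1 ++ (PySem.List.pyRange 0 byte_values.length 1000).map
        (fun i => PySem.List.slice byte_values (some i) (some (i + 1000))),
     acc.2 ++ (PySem.List.pyRange 0 function_starts.length 1000).map
        (fun i => PySem.List.slice function_starts (some i) (some (i + 1000))))

def memory_map_to_rnn_struct (memory_map : List (List (Int × Int × Int))) :
    List (List Int) × List (List Int) :=
  memory_map.foldl pvStepA ([], [])

-- ===== PORT B =====
-- B's inner loop: append b/f to the current-chunk buffers, flush at 1000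
def pvPushB (s : List (List Int) × List (List Int) × List Int × List Int) (v : Int × Int) :
    List (List Int) × List (List Int) × List Int × List Int :=
  let cur_bytes := s.2.2.1 ++ [v.1]
  let cur_starts := s.2.2.2 ++ [v.2]
  if cur_bytes.length = 1000 then (s.1 ++ [cur_bytes], s.2.1 ++ [cur_starts], [], [])
  else (s.1, s.2.1, cur_bytes, cur_starts)

-- B's per-section step: stream the values, then final partial flush ('if cur_bytes:')
def pvStepB (acc : List (List Int) × List (List Int)) (mm : List (Int × Int × Int)) :
    List (List Int) × List (List Int) :=
  let s := ((PySem.Dict.ofList mm).values).foldl pvPushB (acc.1, acc.2, [], [])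
  if s.2.2.1.isEmpty then (s.1, s.2.1) else (s.1 ++ [s.2.2.1], s.2.1 ++ [s.2.2.2])

def memory_map_to_rnn_struct_alt (memory_map : List (List (Int × Int × Int))) :
    List (List Int) × List (List Int) :=
  memory_map.foldl pvStepB ([], [])

-- ===== PRECONDITION & SPEC =====
def Spec_memory_map_to_rnn_struct (memory_map : List (List (Int × Int × Int))) (out : List (List Int) × List (List Int)) : Prop := out = memory_map_to_rnn_struct_alt memory_map
instance (memory_map : List (List (Int × Int × Int))) (out : List (List Int) × List (List Int)) : Decidable (Spec_memory_map_to_rnn_struct memory_map out) := by unfold Spec_memory_map_to_rnn_struct; infer_instance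

-- ===== CLAIM (what is proved, stated in full; the proofs are below) =====
def Claim_equal_memory_map_to_rnn_struct : Prop := ∀ (memory_map : List (List (Int × Int × Int))), Dom_memory_map_to_rnn_struct memory_map → Spec_memory_map_to_rnn_struct memory_map (memory_map_to_rnn_struct memory_map)

-- ===== LEMMAS AND PROOFS =====

-- reference chunking: cut a list into consecutive pieces of (at most) 1000
def pvChunks {α : Type} (vs : List α) : List (List α) :=
  if h : vs = [] then [] else vs.take 1000 :: pvChunks (vs.drop 1000)
termination_by vs.length
decreasing_by
  simp only [List.length_drop]
  exact Nat.sub_lt (List.length_pos_iff.mpr h) (by omega)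

theorem pvChunks_nil {α : Type} : pvChunks ([] : List α) = [] := by
  rw [pvChunks]; simp

theorem pvChunks_short {α : Type} (vs : List α) (h : vs.length < 1000) :
    pvChunks vs = if vs = [] then [] else [vs] := by
  by_cases hv : vs = []
  · rw [pvChunks]; simp [hv]
  · rw [pvChunks, dif_neg hv, if_neg hv, List.take_of_length_le h.le,
        List.drop_of_length_le h.le, pvChunks_nil]

theorem pvChunks_full {α : Type} (hd rest : List α) (h : hd.length = 1000) :
    pvChunks (hd ++ rest) = hd :: pvChunks rest := by
  have hdne : hd ≠ [] := by intro h0; rw [h0] at h; simp at h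
  have hne : hd ++ rest ≠ [] := by
    intro hc; exact hdne (List.append_eq_nil_iff.mp hc).1
  rw [pvChunks, dif_neg hne, ← h, List.take_left, List.drop_left]

-- A's slice comprehension computes the reference chunking
theorem pv_sliceChunks {α : Type} (vs : List α) :
    (PySem.List.pyRange 0 (vs.length : Int) 1000).map
        (fun i => PySem.List.slice vs (some i) (some (i + 1000))) = pvChunks vs := by
  by_cases hv : vs = []
  · subst hv
    have h0 : (([]:List α).length : Int) = 0 := by simp
    rw [h0, PySem.List.pyRange_of_pos 0 0 (by omega : (0:Int) < 1000)]
    simp [pvChunks_nil]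
  · have hlen : 0 < vs.length := List.length_pos_iff.mpr hv
    have hdl : (vs.drop 1000).length = vs.length - 1000 := by simp
    rw [pvChunks, dif_neg hv,
        PySem.List.pyRange_of_pos 0 (vs.length : Int) (by omega : (0:Int) < 1000)]
    have hlt : (0:Int) < (vs.length : Int) := by exact_mod_cast hlen
    rw [if_pos hlt]
    have hm : (((vs.length:Int) - 0 + 1000 - 1) / 1000).toNat
        = ((((vs.drop 1000).length:Int) - 0 + 1000 - 1) / 1000).toNat + 1 := by
      rw [hdl]; omega
    rw [hm, List.range_succ_eq_map, List.map_cons, List.map_cons, List.map_map]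
    congr 1
    · rw [PySem.List.slice_toNat vs (by omega) (by omega)]
      norm_num
      omega
    · rw [← pv_sliceChunks (vs.drop 1000),
          PySem.List.pyRange_of_pos 0 ((vs.drop 1000).length : Int) (by omega : (0:Int) < 1000)]
      by_cases hd : (0:Int) < ((vs.drop 1000).length : Int)
      · rw [if_pos hd]
        simp only [List.map_map]
        apply List.map_congr_left
        intro k _
        simp only [Function.comp_apply]
        rw [PySem.List.slice_toNat vs (by omega) (by omega),
            PySem.List.slice_toNat (vs.drop 1000) (by omega) (by omega),
            List.drop_drop]
        congr 1
        · omega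
        · congr 1; omega
      · have h0 : ((vs.drop 1000).length : Int) = 0 := by
          have := Int.natCast_nonneg (vs.drop 1000).length; omega
        rw [if_neg hd]
        have hz : ((((vs.drop 1000).length : Int) - 0 + 1000 - 1) / 1000).toNat = 0 := by
          rw [h0]; norm_num
        rw [hz]
        simp
termination_by vs.length
decreasing_by
  simp only [List.length_drop]
  exact Nat.sub_lt (List.length_pos_iff.mpr hv) (by omega)

-- the final flush of B's per-section state
def pvFlush (s : List (List Int) × List (List Int) × List Int × List Int) :
    List (List Int) × List (List Int) :=
  if s.2.2.1.isEmpty then (s.1, s.2.1) else (s.1 ++ [s.2.2.1], s.2.1 ++ [s.2.2.2])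

-- the streaming fold + final flush equals appending the reference chunkings
theorem pv_stream (vs : List (Int × Int)) :
    ∀ (acc1 acc2 : List (List Int)) (cb cs : List Int),
    cb.length = cs.length → cb.length < 1000 →
    pvFlush (vs.foldl pvPushB (acc1, acc2, cb, cs))
      = (acc1 ++ pvChunks (cb ++ vs.map (·.1)), acc2 ++ pvChunks (cs ++ vs.map (·.2))) := by
  induction vs with
  | nil =>
    intro acc1 acc2 cb cs hlen hlt
    simp only [List.foldl_nil, List.map_nil, List.append_nil]
    rw [pvChunks_short cb hlt, pvChunks_short cs (by omega)]
    by_cases hcb : cb = []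
    · have hcs : cs = [] := List.eq_nil_of_length_eq_zero (by simpa [hcb] using hlen.symm)
      simp [pvFlush, hcb, hcs]
    · have hcs : cs ≠ [] := by
        intro h; exact hcb (List.eq_nil_of_length_eq_zero (by simpa [h] using hlen))
      simp [pvFlush, hcb, hcs, List.isEmpty_iff]
  | cons v vs ih =>
    intro acc1 acc2 cb cs hlen hlt
    rw [List.foldl_cons]
    by_cases hfull : (cb ++ [v.1]).length = 1000
    · have hp : pvPushB (acc1, acc2, cb, cs) v
          = (acc1 ++ [cb ++ [v.1]], acc2 ++ [cs ++ [v.2]], [], []) := by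
        simp only [pvPushB]; rw [if_pos hfull]
      rw [hp, ih _ _ [] [] rfl (by simp)]
      have hcsfull : (cs ++ [v.2]).length = 1000 := by
        simp at hfull ⊢; omega
      rw [show cb ++ (v :: vs).map (·.1) = (cb ++ [v.1]) ++ vs.map (·.1) by simp,
          show cs ++ (v :: vs).map (·.2) = (cs ++ [v.2]) ++ vs.map (·.2) by simp,
          pvChunks_full _ _ hfull, pvChunks_full _ _ hcsfull]
      simp
    · have hp : pvPushB (acc1, acc2, cb, cs) v
          = (acc1, acc2, cb ++ [v.1], cs ++ [v.2]) := by
        simp only [pvPushB]; rw [if_neg hfull]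
      rw [hp, ih _ _ _ _ (by simp [hlen]) (by simp at hfull ⊢; omega)]
      simp

theorem pv_step_eq (acc : List (List Int) × List (List Int)) (mm : List (Int × Int × Int)) :
    pvStepA acc mm = pvStepB acc mm := by
  have hB : pvStepB acc mm
      = (acc.1 ++ pvChunks ((PySem.Dict.ofList mm).values.map (·.1)),
         acc.2 ++ pvChunks ((PySem.Dict.ofList mm).values.map (·.2))) := by
    have h := pv_stream ((PySem.Dict.ofList mm).values) acc.1 acc.2 [] [] rfl (by simp)
    simp only [List.nil_append] at h
    exact h
  rw [hB]
  simp only [pvStepA]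
  by_cases h : (PySem.Dict.ofList mm).values.isEmpty
  · have hv : (PySem.Dict.ofList mm).values = [] := List.isEmpty_iff.mp h
    rw [if_pos h]
    simp [hv, pvChunks_nil]
  · rw [if_neg h]
    have h1 := pv_sliceChunks ((PySem.Dict.ofList mm).values.map (·.1))
    have h2 := pv_sliceChunks ((PySem.Dict.ofList mm).values.map (·.2))
    rw [h1, h2]

-- ===== VERDICT (by name: the statement is the Claim_ definition above) =====
theorem memory_map_to_rnn_struct_spec : Claim_equal_memory_map_to_rnn_struct := by
  intro memory_map _
  show memory_map.foldl pvStepA ([], []) = memory_map.foldl pvStepB ([], [])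
  have : pvStepA = pvStepB := funext fun acc => funext fun mm => pv_step_eq acc mm
  rw [this]
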